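-- pv_equiv track=rewrite | github.com/dhirajsingh29/DSA_Python | array/easy/smallernumberthancurrent.py | smallerNumbersThanCurrent_2
-- ===== SOURCE A (Python) =====
-- from typing import List
--
-- def smallerNumbersThanCurrent_2(nums: List[int]) -> List[int]:
--     sorted_nums = sorted(nums)
--     order_dict = {}
--
--     for i, num in enumerate(sorted_nums):
--         if num not in order_dict:
--             order_dict[num] = i
--
--     result = []
--     for num in nums:
--         result.append(order_dict[num])
--
--     return result
-- ===== SOURCE B (Python) =====
-- from typing import List
--
-- def smallerNumbersThanCurrent_2(nums: List[int]) -> List[int]: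
--     return [sum(1 for y in nums if y < x) for x in nums]
-- ===== Notes on version B (the rewrite author's own statement) =====
-- stated objective: simpler
-- what changed: Replaces the sort + first-occurrence-index dictionary with a direct nested scan: for each element, count the values strictly smaller than it.
import Mathlib
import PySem

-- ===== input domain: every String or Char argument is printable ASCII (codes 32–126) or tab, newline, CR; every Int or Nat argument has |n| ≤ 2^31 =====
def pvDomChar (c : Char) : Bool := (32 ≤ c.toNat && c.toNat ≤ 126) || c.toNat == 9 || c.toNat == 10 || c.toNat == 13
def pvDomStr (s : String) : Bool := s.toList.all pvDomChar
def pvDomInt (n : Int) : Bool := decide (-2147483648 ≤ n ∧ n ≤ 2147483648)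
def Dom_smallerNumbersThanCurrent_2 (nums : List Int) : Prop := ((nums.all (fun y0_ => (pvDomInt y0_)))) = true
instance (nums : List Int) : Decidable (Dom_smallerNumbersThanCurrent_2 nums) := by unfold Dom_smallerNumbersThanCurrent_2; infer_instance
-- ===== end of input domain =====

-- B drops A's sort + first-occurrence-index dictionary and instead counts, for each
-- element, the values strictly smaller than it (nested scan); objective: simpler.

-- ===== PORT A =====
def smallerNumbersThanCurrent_2 (nums : List Int) : List Int :=
  let sorted_nums := PySem.List.sorted nums (fun x => x) false
  let order_dict : PySem.Dict Int Int :=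
    (PySem.List.enumerate sorted_nums 0).foldl
      (fun d p => if d.contains p.2 then d else d.insert p.2 p.1) PySem.Dict.empty
  -- order_dict[num]: the key is always present (num ∈ nums = perm of sorted_nums),
  -- so Python's KeyError is unreachable; getD's default is never used.
  nums.foldl (fun result num => result ++ [order_dict.getD num 0]) []

-- ===== PORT B =====
def smallerNumbersThanCurrent_2_alt (nums : List Int) : List Int :=
  nums.map (fun x => ((nums.countP (fun y => decide (y < x)) : Nat) : Int))

-- ===== PRECONDITION & SPEC =====
def Spec_smallerNumbersThanCurrent_2 (nums : List Int) (out : List Int) : Prop := out = smallerNumbersThanCurrent_2_alt nums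
instance (nums : List Int) (out : List Int) : Decidable (Spec_smallerNumbersThanCurrent_2 nums out) := by unfold Spec_smallerNumbersThanCurrent_2; infer_instance

-- ===== CLAIM (what is proved, stated in full; the proofs are below) =====
def Claim_equal_smallerNumbersThanCurrent_2 : Prop := ∀ (nums : List Int), Dom_smallerNumbersThanCurrent_2 nums → Spec_smallerNumbersThanCurrent_2 nums (smallerNumbersThanCurrent_2 nums)

-- ===== LEMMAS AND PROOFS =====

-- first index recorded for key a by A's insert-if-absent loop
def pvFirstIdx? (ps : List (Int × Int)) (a : Int) : Option Int :=
  (ps.find? (fun p => p.2 == a)).map (·.1)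

theorem pvFirstIdx?_nil (a : Int) : pvFirstIdx? [] a = none := rfl

theorem pvFirstIdx?_cons (p : Int × Int) (ps : List (Int × Int)) (a : Int) :
    pvFirstIdx? (p :: ps) a = if p.2 = a then some p.1 else pvFirstIdx? ps a := by
  unfold pvFirstIdx?
  rw [List.find?_cons]
  by_cases h : p.2 = a
  · simp [h]
  · have hb : (p.2 == a) = false := by simp [h]
    simp [h, hb]

-- the dict built by A's loop answers get? by: old binding first, else first matching pair
theorem buildA_get? (ps : List (Int × Int)) (d : PySem.Dict Int Int) (a : Int) :
    (ps.foldl (fun d p => if d.contains p.2 then d else d.insert p.2 p.1) d).get? a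
      = ((d.get? a).orElse (fun _ => pvFirstIdx? ps a)) := by
  induction ps generalizing d with
  | nil => simp [pvFirstIdx?_nil]
  | cons p ps ih =>
    simp only [List.foldl_cons, ih, pvFirstIdx?_cons]
    by_cases hc : d.contains p.2 = true
    · rw [if_pos hc]
      by_cases hpa : p.2 = a
      · subst hpa
        have hsome : (d.get? p.2).isSome := by
          rw [← PySem.Dict.contains_eq_isSome_get?]; exact hc
        rcases Option.isSome_iff_exists.mp hsome with ⟨v, hv⟩
        simp [hv]
      · simp [hpa]
    · rw [if_neg hc]
      by_cases hpa : p.2 = a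
      · subst hpa
        have hnone : d.get? p.2 = none := by
          rw [← Option.not_isSome_iff_eq_none, ← PySem.Dict.contains_eq_isSome_get?]
          simp [hc]
        simp [PySem.Dict.get?_insert_self, hnone]
      · rw [PySem.Dict.get?_insert_of_ne d p.1 (fun h => hpa h.symm)]
        simp [hpa]

-- on a ≤-sorted list, the first occurrence index of a (from start i) is i + #{y < a}
theorem firstIdx_enumerate_sorted (s : List Int) (i : Int) (a : Int)
    (hs : s.Pairwise (fun x y => x ≤ y)) (ha : a ∈ s) :
    pvFirstIdx? (PySem.List.enumerate s i) a
      = some (i + (s.countP (fun y => decide (y < a)) : Nat)) := by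
  induction s generalizing i with
  | nil => cases ha
  | cons h t ih =>
    rw [PySem.List.enumerate_cons, pvFirstIdx?_cons]
    rcases List.pairwise_cons.mp hs with ⟨hle, ht⟩
    by_cases hha : h = a
    · subst hha
      have hzero : t.countP (fun y => decide (y < h)) = 0 := by
        rw [List.countP_eq_zero]
        intro y hy
        simpa using not_lt.mpr (hle y hy)
      simp [hzero]
    · have hat : a ∈ t := by
        rcases List.mem_cons.mp ha with heq | hm
        · exact absurd heq.symm hha
        · exact hm
      have hlt : h < a := lt_of_le_of_ne (hle a hat) hha
      rw [if_neg hha, ih (i + 1) ht hat]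
      simp only [List.countP_cons, hlt, if_pos, decide_true]
      congr 1
      push_cast
      ring

-- every element's dict value equals the strict-smaller count
theorem lookup_eq_count (nums : List Int) (num : Int) (hmem : num ∈ nums) :
    (((PySem.List.enumerate (PySem.List.sorted nums (fun x => x) false) 0).foldl
        (fun d p => if d.contains p.2 then d else d.insert p.2 p.1)
        PySem.Dict.empty).getD num 0)
      = ((nums.countP (fun y => decide (y < num)) : Nat) : Int) := by
  have hperm := PySem.List.sorted_perm nums (fun x => x) false
  have hpw : (PySem.List.sorted nums (fun x => x) false).Pairwise (fun x y => x ≤ y) :=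
    PySem.List.sorted_pairwise nums (fun x => x)
  have hmem' : num ∈ PySem.List.sorted nums (fun x => x) false :=
    (PySem.List.mem_sorted nums (fun x => x) false num).mpr hmem
  have hget := buildA_get? (PySem.List.enumerate (PySem.List.sorted nums (fun x => x) false) 0)
      PySem.Dict.empty num
  rw [firstIdx_enumerate_sorted _ 0 num hpw hmem'] at hget
  rw [PySem.Dict.getD_eq_get?_getD, hget]
  simp [PySem.Dict.get?_empty, hperm.countP_eq]

-- ===== VERDICT (by name: the statement is the Claim_ definition above) =====
theorem smallerNumbersThanCurrent_2_spec : Claim_equal_smallerNumbersThanCurrent_2 := by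
  intro nums _
  unfold Spec_smallerNumbersThanCurrent_2 smallerNumbersThanCurrent_2 smallerNumbersThanCurrent_2_alt
  simp only []
  rw [PySem.List.foldl_append_singleton_eq_map]
  rw [List.nil_append]
  exact List.map_congr_left (fun num hmem => lookup_eq_count nums num hmem)
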